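-- pv_equiv track=rewrite | github.com/mko3000/tira | tira_vk2/permutations.py | badcount
-- ===== SOURCE A (Python) =====
-- def badcount(a, b):
--     counter = 0
--     for i in range(len(a)-1):
--         for j in range(len(b)-1):
--             if b[len(b)-j-1] == a[i] and i<len(b)-j-1:
--                 counter += 1
--                 break
--     return counter
-- ===== SOURCE B (Python) =====
-- def badcount(a, b):
--     last = {}
--     for k in range(1, len(b)):
--         last[b[k]] = k
--     return sum(1 for i in range(len(a) - 1) if last.get(a[i], -1) > i)
-- ===== Notes on version B (the rewrite author's own statement) =====
-- stated objective: faster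
-- what changed: Replaced the per-element descending rescan of b (with break) by a dict mapping each value to its last index in b[1:], built once, plus a single pass over a[:-1].
import Mathlib
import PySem

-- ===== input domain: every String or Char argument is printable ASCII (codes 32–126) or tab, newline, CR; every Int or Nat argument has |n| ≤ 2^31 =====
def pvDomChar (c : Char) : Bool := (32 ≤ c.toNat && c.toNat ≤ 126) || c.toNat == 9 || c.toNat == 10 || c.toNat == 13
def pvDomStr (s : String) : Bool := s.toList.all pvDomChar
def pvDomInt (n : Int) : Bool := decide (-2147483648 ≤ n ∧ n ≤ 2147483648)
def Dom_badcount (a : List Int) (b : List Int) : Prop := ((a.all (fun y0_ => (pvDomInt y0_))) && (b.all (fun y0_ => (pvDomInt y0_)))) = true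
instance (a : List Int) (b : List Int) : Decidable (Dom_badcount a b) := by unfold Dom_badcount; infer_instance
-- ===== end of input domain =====

-- B replaces A's O(n*m) rescans of b by a value→last-index dict and one pass over a (return value only; neither mutates).

-- ===== PORT A =====
-- inner 'for j' loop with its break: returns the increment (1) if the break fired, else 0
def badcountInner (a : List Int) (b : List Int) (i : Int) : List Int → Int
  | [] => 0
  | j :: js =>
    if (PySem.List.pyGetD b ((b.length : Int) - j - 1) 0 == PySem.List.pyGetD a i 0)
        && decide (i < (b.length : Int) - j - 1)
    then 1
    else badcountInner a b i js

def badcount (a : List Int) (b : List Int) : Int :=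
  (PySem.List.pyRange 0 ((a.length : Int) - 1) 1).foldl
    (fun counter i =>
      counter + badcountInner a b i (PySem.List.pyRange 0 ((b.length : Int) - 1) 1)) 0

-- ===== PORT B =====
def badcount_alt (a : List Int) (b : List Int) : Int :=
  let last :=
    (PySem.List.pyRange 1 (b.length : Int) 1).foldl
      (fun d k => d.insert (PySem.List.pyGetD b k 0) k) (PySem.Dict.empty : PySem.Dict Int Int)
  (PySem.List.pyRange 0 ((a.length : Int) - 1) 1).foldl
    (fun c i => if last.getD (PySem.List.pyGetD a i 0) (-1) > i then c + 1 else c) 0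

-- ===== PRECONDITION & SPEC =====
def Spec_badcount (a : List Int) (b : List Int) (out : Int) : Prop := out = badcount_alt a b
instance (a : List Int) (b : List Int) (out : Int) : Decidable (Spec_badcount a b out) := by unfold Spec_badcount; infer_instance

-- ===== CLAIM (what is proved, stated in full; the proofs are below) =====
def Claim_equal_badcount : Prop := ∀ (a : List Int) (b : List Int), Dom_badcount a b → Spec_badcount a b (badcount a b)

-- ===== LEMMAS AND PROOFS =====

-- running "last k with g k = v" accumulator, the value the dict fold stores for key v
def lastAcc (g : Int → Int) (v : Int) (ks : List Int) (acc : Int) : Int :=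
  ks.foldl (fun acc k => if g k = v then k else acc) acc

lemma lastAcc_nil (g : Int → Int) (v acc : Int) : lastAcc g v [] acc = acc := rfl

lemma lastAcc_snoc (g : Int → Int) (v acc k : Int) (ks : List Int) :
    lastAcc g v (ks ++ [k]) acc = if g k = v then k else lastAcc g v ks acc := by
  simp [lastAcc, List.foldl_append]

lemma lastAcc_cases (g : Int → Int) (v : Int) (ks : List Int) (acc : Int) :
    lastAcc g v ks acc = acc ∨ lastAcc g v ks acc ∈ ks := by
  induction ks using List.reverseRecOn with
  | nil => left; rfl
  | append_singleton ks k ih =>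
    rw [lastAcc_snoc]
    split
    · right; simp
    · rcases ih with h | h
      · left; exact h
      · right; simp [h]

lemma getD_foldl_insert_lastAcc (g : Int → Int) (ks : List Int) (d : PySem.Dict Int Int)
    (v dflt : Int) :
    (ks.foldl (fun d k => d.insert (g k) k) d).getD v dflt =
      lastAcc g v ks (d.getD v dflt) := by
  induction ks generalizing d with
  | nil => rfl
  | cons k ks ih =>
    have hstep : lastAcc g v (k :: ks) (d.getD v dflt)
        = lastAcc g v ks (if g k = v then k else d.getD v dflt) := rfl
    rw [List.foldl_cons, ih, hstep]
    congr 1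
    rw [PySem.Dict.getD_insert]
    by_cases h : g k = v
    · simp [h]
    · rw [if_neg (fun h' => h h'.symm), if_neg h]

-- inner break loop re-expressed over the list of scanned b-indices k = len(b)-j-1
def rowK (b : List Int) (v i : Int) : List Int → Int
  | [] => 0
  | k :: t =>
    if (PySem.List.pyGetD b k 0 == v) && decide (i < k) then 1 else rowK b v i t

lemma badcountInner_eq_rowK (a b : List Int) (i : Int) (js : List Int) :
    badcountInner a b i js =
      rowK b (PySem.List.pyGetD a i 0) i (js.map (fun j => (b.length : Int) - j - 1)) := by
  induction js with
  | nil => rfl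
  | cons j js ih => simp only [badcountInner, List.map_cons, rowK, ih]

lemma map_range_eq_reverse (n : Int) :
    (PySem.List.pyRange 0 (n - 1) 1).map (fun j => n - j - 1) =
      (PySem.List.pyRange 1 n 1).reverse := by
  rw [show PySem.List.pyRange 1 n 1 = PySem.List.pyRange (0 + 1) ((n - 1) + 1) 1 by norm_num,
    ← PySem.List.pyRange_neg_one_eq_reverse]
  rw [PySem.List.pyRange_one, PySem.List.pyRange_neg_one, List.map_map]
  apply List.map_congr_left
  intro k _
  simp
  omega

lemma rowK_reverse (b : List Int) (v i : Int) (ks : List Int)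
    (hsorted : ks.Pairwise (· < ·)) (hi : 0 ≤ i) :
    rowK b v i ks.reverse =
      if lastAcc (fun k => PySem.List.pyGetD b k 0) v ks (-1) > i then 1 else 0 := by
  induction ks using List.reverseRecOn with
  | nil => simp [rowK, lastAcc_nil]; omega
  | append_singleton ks k ih =>
    have hlt : ∀ x ∈ ks, x < k := by
      intro x hx
      exact (List.pairwise_append.mp hsorted).2.2 x hx k (by simp)
    have hsorted' : ks.Pairwise (· < ·) := (List.pairwise_append.mp hsorted).1
    rw [List.reverse_append, List.reverse_singleton, List.singleton_append, lastAcc_snoc]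
    simp only [rowK]
    by_cases hv : PySem.List.pyGetD b k 0 = v
    · rw [if_pos hv]
      by_cases hik : i < k
      · rw [if_pos (by simp [hv, hik]), if_pos (by omega)]
      · have hle : lastAcc (fun k => PySem.List.pyGetD b k 0) v ks (-1) ≤ i := by
          rcases lastAcc_cases (fun k => PySem.List.pyGetD b k 0) v ks (-1) with h | h
          · omega
          · have := hlt _ h; omega
        rw [if_neg (by simp [hik]), ih hsorted', if_neg (by omega), if_neg (by omega)]
    · rw [if_neg hv, if_neg (by simp [hv]), ih hsorted']

lemma row_eq (a b : List Int) (i : Int) (hi : 0 ≤ i) :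
    badcountInner a b i (PySem.List.pyRange 0 ((b.length : Int) - 1) 1) =
      if ((PySem.List.pyRange 1 (b.length : Int) 1).foldl
            (fun d k => d.insert (PySem.List.pyGetD b k 0) k)
            (PySem.Dict.empty : PySem.Dict Int Int)).getD (PySem.List.pyGetD a i 0) (-1) > i
      then 1 else 0 := by
  rw [badcountInner_eq_rowK, map_range_eq_reverse,
    rowK_reverse _ _ _ _ (PySem.List.pairwise_lt_pyRange_one 1 (b.length : Int) ) hi,
    getD_foldl_insert_lastAcc]
  rfl

-- ===== VERDICT (by name: the statement is the Claim_ definition above) =====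
theorem badcount_spec : Claim_equal_badcount := by
  intro a b _
  show badcount a b = badcount_alt a b
  unfold badcount badcount_alt
  apply PySem.List.foldl_congr_mem
  intro c i hi
  have h0 : 0 ≤ i := ((PySem.List.mem_pyRange_one).mp hi).1
  rw [row_eq a b i h0]
  split <;> omega
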